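-- pv_equiv track=rewrite | github.com/ferbetanzo/sudoku-nisq | src/python_package/modified_grover.py | generate_valid_combinations
-- ===== SOURCE A (Python) =====
-- from itertools import combinations
--
-- def generate_valid_combinations(elements, combination_size, forbidden_difference):
--     """
--     Generates valid combinations of a set of elements that meet the condition
--     that the difference between any pair of elements is not equal to forbidden_difference.
--
--     :param elements: Set of elements to generate combinations from.
--     :param combination_size: Size of each combination.
--     :param forbidden_difference: Forbidden difference between elements in a combination.
--     :return: List of valid combinations.
--     """
--
--     # Function to check the condition of difference
--     def difference_is_not_forbidden(combination):
--         for a, b in combinations(combination, 2):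
--             if abs(a - b) == forbidden_difference:
--                 return False
--         return True
--
--     # Generate all possible combinations of the specified size
--     valid_combinations = [
--         combination for combination in combinations(elements, combination_size)
--         if difference_is_not_forbidden(combination)
--     ]
--
--     return valid_combinations
-- ===== SOURCE B (Python) =====
-- def generate_valid_combinations(elements, combination_size, forbidden_difference):
--     """Backtracking with pruning: build combinations left-to-right, extending a
--     partial tuple only with elements compatible with everything already chosen."""
--     def go(chosen, seq):
--         if len(chosen) == combination_size:
--             return [tuple(chosen)]
--         if not seq:
--             return []
--         x, rest = seq[0], seq[1:]
--         out = []
--         if all(abs(x - c) != forbidden_difference for c in chosen):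
--             out.extend(go(chosen + [x], rest))
--         out.extend(go(chosen, rest))
--         return out
--     return go([], list(elements))
-- ===== Notes on version B (the rewrite author's own statement) =====
-- stated objective: alternative
-- what changed: A generates all C(n,k) combinations and filters each with a full pairwise check; B builds combinations by backtracking, pruning a partial tuple as soon as a new element conflicts with one already chosen, so invalid branches are never expanded.
import Mathlib
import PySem

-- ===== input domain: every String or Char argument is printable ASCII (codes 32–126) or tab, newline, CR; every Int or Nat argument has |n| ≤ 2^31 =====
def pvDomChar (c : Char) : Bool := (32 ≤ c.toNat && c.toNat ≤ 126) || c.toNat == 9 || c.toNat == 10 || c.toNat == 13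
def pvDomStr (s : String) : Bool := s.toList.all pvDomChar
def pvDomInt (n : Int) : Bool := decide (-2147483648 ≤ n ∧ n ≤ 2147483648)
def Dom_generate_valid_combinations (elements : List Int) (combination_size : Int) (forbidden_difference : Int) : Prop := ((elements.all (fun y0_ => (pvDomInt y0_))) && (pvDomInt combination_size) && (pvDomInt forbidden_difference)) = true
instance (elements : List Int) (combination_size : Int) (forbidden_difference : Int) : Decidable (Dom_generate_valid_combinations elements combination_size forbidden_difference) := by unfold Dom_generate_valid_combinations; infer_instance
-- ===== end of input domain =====

-- B replaces A's generate-all-then-filter with a pruned backtracking search (same results, alternative algorithm).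


-- ===== PORT A =====
-- itertools.combinations(xs, k): lexicographic-by-position size-k combinations.
def pyCombinations : Nat → List Int → List (List Int)
  | 0, _ => [[]]
  | _ + 1, [] => []
  | k + 1, x :: xs => (pyCombinations k xs).map (x :: ·) ++ pyCombinations (k + 1) xs

-- A's helper: loops over combinations(combination, 2) and rejects on a forbidden pair.
def diffNotForbidden (d : Int) : List Int → Bool
  | [] => true
  | a :: rest => rest.all (fun b => !(|a - b| == d)) && diffNotForbidden d rest

def generate_valid_combinations (elements : List Int) (combination_size : Int) (forbidden_difference : Int) : List (List Int) :=
  (pyCombinations combination_size.toNat elements).filter (fun c => diffNotForbidden forbidden_difference c)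

-- ===== PORT B =====
-- B's recursive backtracking helper: extend `chosen` with compatible elements of `seq` in order.
def goB (d k : Int) (chosen : List Int) : List Int → List (List Int)
  | [] => if (chosen.length : Int) = k then [chosen] else []
  | x :: xs =>
    if (chosen.length : Int) = k then [chosen]
    else
      (if chosen.all (fun c => !(|x - c| == d)) then goB d k (chosen ++ [x]) xs else []) ++
      goB d k chosen xs

def generate_valid_combinations_alt (elements : List Int) (combination_size : Int) (forbidden_difference : Int) : List (List Int) :=
  goB forbidden_difference combination_size [] elements

-- ===== PRECONDITION & SPEC =====
-- A raises ValueError for a negative combination_size (itertools.combinations); excluded here.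
def Pre_generate_valid_combinations (elements : List Int) (combination_size : Int) (forbidden_difference : Int) : Prop :=
  0 ≤ combination_size
instance (elements : List Int) (combination_size : Int) (forbidden_difference : Int) : Decidable (Pre_generate_valid_combinations elements combination_size forbidden_difference) := by unfold Pre_generate_valid_combinations; infer_instance

def pvWitness_generate_valid_combinations : List Int × Int × Int := ([1, 2, 3, 4], 2, 1)

def Spec_generate_valid_combinations (elements : List Int) (combination_size : Int) (forbidden_difference : Int) (out : List (List Int)) : Prop := out = generate_valid_combinations_alt elements combination_size forbidden_difference
instance (elements : List Int) (combination_size : Int) (forbidden_difference : Int) (out : List (List Int)) : Decidable (Spec_generate_valid_combinations elements combination_size forbidden_difference out) := by unfold Spec_generate_valid_combinations; infer_instance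

-- ===== CLAIM (what is proved, stated in full; the proofs are below) =====
def Claim_equal_generate_valid_combinations : Prop := ∀ (elements : List Int) (combination_size : Int) (forbidden_difference : Int), Dom_generate_valid_combinations elements combination_size forbidden_difference → Pre_generate_valid_combinations elements combination_size forbidden_difference → Spec_generate_valid_combinations elements combination_size forbidden_difference (generate_valid_combinations elements combination_size forbidden_difference)
-- ===== LEMMAS AND PROOFS =====

-- all elements of `chosen` are compatible with all elements of `c`
def cross (d : Int) (chosen c : List Int) : Bool :=
  chosen.all (fun a => c.all (fun b => !(|a - b| == d)))

lemma all_and_distrib (p q : Int → Bool) (l : List Int) :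
    (l.all fun a => p a && q a) = (l.all p && l.all q) := by
  induction l with
  | nil => rfl
  | cons a l ih =>
    simp only [List.all_cons, ih]
    cases p a <;> cases q a <;> cases l.all p <;> cases l.all q <;> rfl

lemma diffNotForbidden_append_singleton (d : Int) (l : List Int) (x : Int) :
    diffNotForbidden d (l ++ [x]) = (diffNotForbidden d l && l.all (fun a => !(|a - x| == d))) := by
  induction l with
  | nil => simp [diffNotForbidden]
  | cons a l ih =>
    simp only [List.cons_append, diffNotForbidden, ih, List.all_append, List.all_cons,
      List.all_nil, Bool.and_true]
    cases l.all (fun b => !(|a - b| == d)) <;> cases diffNotForbidden d l <;>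
      cases l.all (fun b => !(|b - x| == d)) <;> cases (!(|a - x| == d)) <;> rfl

lemma goB_eq (d k : Int) (seq : List Int) :
    ∀ (m : Nat) (chosen : List Int),
      (chosen.length : Int) + m = k →
      diffNotForbidden d chosen = true →
      goB d k chosen seq =
        ((pyCombinations m seq).filter
            (fun c => cross d chosen c && diffNotForbidden d c)).map (chosen ++ ·) := by
  induction seq with
  | nil =>
    intro m chosen hlen hok
    cases m with
    | zero =>
      have : (chosen.length : Int) = k := by omega
      simp [goB, this, pyCombinations, cross, diffNotForbidden]
    | succ m' =>
      have : (chosen.length : Int) ≠ k := by omega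
      simp [goB, this, pyCombinations]
  | cons x xs ih =>
    intro m chosen hlen hok
    cases m with
    | zero =>
      have : (chosen.length : Int) = k := by omega
      simp [goB, this, pyCombinations, cross, diffNotForbidden]
    | succ m' =>
      have hne : (chosen.length : Int) ≠ k := by omega
      have hcrosscons : ∀ c : List Int,
          cross d chosen (x :: c) =
            (chosen.all (fun a => !(|a - x| == d)) && cross d chosen c) := by
        intro c
        simp only [cross, List.all_cons]
        exact all_and_distrib _ _ chosen
      by_cases hx : chosen.all (fun c => !(|x - c| == d)) = true
      · -- x is compatible with everything chosen
        have hx' : chosen.all (fun a => !(|a - x| == d)) = true := by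
          rw [← hx]; congr 1; funext a; rw [abs_sub_comm]
        have hok' : diffNotForbidden d (chosen ++ [x]) = true := by
          rw [diffNotForbidden_append_singleton, hok, hx']; rfl
        have hlen' : ((chosen ++ [x]).length : Int) + m' = k := by
          simp [List.length_append]; omega
        have hpred : ∀ c : List Int,
            ((fun c => cross d chosen c && diffNotForbidden d c) (x :: c)) =
              (cross d (chosen ++ [x]) c && diffNotForbidden d c) := by
          intro c
          show (cross d chosen (x :: c) && diffNotForbidden d (x :: c)) = _
          rw [hcrosscons c, hx', Bool.true_and]
          simp only [cross, List.all_append, List.all_cons, List.all_nil, Bool.and_true,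
            diffNotForbidden]
          rw [← Bool.and_assoc]
        simp only [goB]
        rw [if_neg hne, if_pos hx]
        rw [ih m' (chosen ++ [x]) hlen' hok', ih (m' + 1) chosen hlen hok]
        rw [show pyCombinations (m' + 1) (x :: xs)
              = (pyCombinations m' xs).map (x :: ·) ++ pyCombinations (m' + 1) xs from rfl]
        rw [List.filter_append, List.map_append]
        congr 1
        rw [List.filter_map, List.map_map]
        simp only [Function.comp_def, hpred]
        apply List.map_congr_left
        intro c _
        simp
      · -- x conflicts with something chosen: the whole branch is pruned / filtered out
        have hx' : chosen.all (fun a => !(|a - x| == d)) = false := by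
          cases h : chosen.all (fun a => !(|a - x| == d)) with
          | false => rfl
          | true => exact absurd (by rw [← h]; congr 1; funext a; rw [abs_sub_comm]) hx
        simp only [goB, if_neg hne, hx, if_neg, Bool.false_eq_true, not_false_iff,
          List.nil_append, pyCombinations, List.filter_append, List.map_append]
        rw [ih (m' + 1) chosen hlen hok]
        have : (((pyCombinations m' xs).map (x :: ·)).filter
            (fun c => cross d chosen c && diffNotForbidden d c)) = [] := by
          rw [List.filter_eq_nil_iff]
          intro c hc
          rcases List.mem_map.mp hc with ⟨c', _, rfl⟩
          simp [hcrosscons c', hx']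
        rw [this]
        simp

-- ===== VERDICT (by name: the statement is the Claim_ definition above) =====
theorem generate_valid_combinations_spec : Claim_equal_generate_valid_combinations := by
  intro elements k d _ hpre
  unfold Spec_generate_valid_combinations generate_valid_combinations generate_valid_combinations_alt
  have h0 : ((([] : List Int)).length : Int) + (k.toNat : Int) = k := by
    simp [Int.toNat_of_nonneg hpre]
  rw [goB_eq d k elements k.toNat [] h0 rfl]
  simp [cross]
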